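-- pv_equiv track=rewrite | github.com/adobe-research/speaker-identification | individual_model.py | token_lens_to_idxs
-- ===== SOURCE A (Python) =====
-- def token_lens_to_idxs(token_lens):
--     max_token_num = max([len(x) for x in token_lens])
--     max_token_len = max([max(x) for x in token_lens])
--     idxs = []
--     for seq_token_lens in token_lens:
--         seq_idxs = []
--         offset = 0
--         for token_len in seq_token_lens:
--             seq_idxs.append([offset, offset + token_len])
--             offset += token_len
--         seq_idxs.extend([[-1, 0]] * (max_token_num - len(seq_token_lens)))
--         idxs.append(seq_idxs)
--     return idxs, max_token_num, max_token_len
-- ===== SOURCE B (Python) =====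
-- def token_lens_to_idxs(token_lens):
--     max_token_num = max(len(x) for x in token_lens)
--     max_token_len = max(max(x) for x in token_lens)
--     # Column-major: build the table one token-position (column) at a time,
--     # advancing all sequences' offsets in lockstep, then transpose.
--     offsets = [0] * len(token_lens)
--     cols = []
--     for j in range(max_token_num):
--         col = []
--         new_offsets = []
--         for off, seq in zip(offsets, token_lens):
--             if j < len(seq):
--                 end = off + seq[j]
--                 col.append([off, end])
--                 new_offsets.append(end)
--             else:
--                 col.append([-1, 0])
--                 new_offsets.append(off)
--         offsets = new_offsets
--         cols.append(col)
--     idxs = [list(row) for row in zip(*cols)]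
--     return idxs, max_token_num, max_token_len
-- ===== Notes on version B (the rewrite author's own statement) =====
-- stated objective: alternative
-- what changed: B builds the index table column-major: an outer loop over token positions advances all sequences' running offsets in lockstep and emits one column (with [-1,0] for exhausted sequences) per position, and the column list is transposed with zip(*cols) at the end, instead of A's row-major per-sequence accumulator loop with padding appended per row.
import Mathlib
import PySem

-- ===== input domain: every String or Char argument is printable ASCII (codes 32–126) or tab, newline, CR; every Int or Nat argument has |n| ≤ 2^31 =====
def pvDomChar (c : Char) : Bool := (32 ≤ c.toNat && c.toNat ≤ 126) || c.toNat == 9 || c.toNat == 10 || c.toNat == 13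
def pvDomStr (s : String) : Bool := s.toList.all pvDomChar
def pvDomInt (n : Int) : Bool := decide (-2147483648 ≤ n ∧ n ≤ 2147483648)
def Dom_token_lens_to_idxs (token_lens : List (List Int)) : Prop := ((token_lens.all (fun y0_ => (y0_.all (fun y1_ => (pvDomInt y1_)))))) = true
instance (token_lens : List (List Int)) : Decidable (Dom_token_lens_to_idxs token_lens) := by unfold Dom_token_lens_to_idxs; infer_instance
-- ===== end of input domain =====

-- B builds the table column-major (one token position at a time, advancing all sequences'
-- offsets in lockstep) and transposes at the end, instead of A's row-major accumulator loop;
-- same outputs, same asymptotic cost.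

-- ===== PORT A =====
def token_lens_to_idxs (token_lens : List (List Int)) : List (List (List Int)) × Int × Int :=
  let max_token_num : Int := (PySem.List.max? (token_lens.map (fun x => (x.length : Int))) (fun y => y)).getD 0
  let max_token_len : Int := (PySem.List.max? (token_lens.map (fun x => (PySem.List.max? x (fun y => y)).getD 0)) (fun y => y)).getD 0
  let idxs := token_lens.foldl (fun (idxs : List (List (List Int))) seq_token_lens =>
    let st := seq_token_lens.foldl (fun (st : List (List Int) × Int) token_len =>
      (st.1 ++ [[st.2, st.2 + token_len]], st.2 + token_len)) ([], 0)
    let seq_idxs := st.1 ++ List.replicate (max_token_num - (seq_token_lens.length : Int)).toNat ([-1, 0] : List Int)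
    idxs ++ [seq_idxs]) []
  (idxs, max_token_num, max_token_len)

-- ===== PORT B =====
-- termination helper for pvZipStar (cited in its decreasing_by)
lemma pvTailLenSum_le {α : Type} (ls : List (List α)) :
    (((ls.map List.tail).map List.length).sum) ≤ ((ls.map List.length).sum) := by
  induction ls with
  | nil => simp
  | cons x xs ih =>
    simp only [List.map_cons, List.sum_cons]
    have hx : x.tail.length = x.length - 1 := List.length_tail
    omega

lemma pvZipStar_dec {α : Type} (ls : List (List α)) (h : (ls.isEmpty || ls.any List.isEmpty) = false) :
    (((ls.map List.tail).map List.length).sum) < ((ls.map List.length).sum) := by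
  cases ls with
  | nil => simp at h
  | cons x xs =>
    simp only [Bool.or_eq_false_iff, List.any_cons, Bool.or_eq_false_iff] at h
    have hx : x ≠ [] := by
      intro hx; subst hx; simp at h
    have h1 : x.tail.length < x.length := by
      have h3 : x.tail.length = x.length - 1 := List.length_tail
      have h4 := List.length_pos_of_ne_nil hx
      omega
    have h2 := pvTailLenSum_le xs
    simp only [List.map_cons, List.sum_cons]
    omega

-- transliteration of Python zip(*cols) (truncate at the first exhausted list)
def pvZipStar {α : Type} (ls : List (List α)) : List (List α) :=
  if _h : (ls.isEmpty || ls.any List.isEmpty) = true then []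
  else (ls.filterMap List.head?) :: pvZipStar (ls.map List.tail)
termination_by ((ls.map List.length).sum)
decreasing_by exact pvZipStar_dec ls (by rw [Bool.not_eq_true] at _h; exact _h)

def token_lens_to_idxs_alt (token_lens : List (List Int)) : List (List (List Int)) × Int × Int :=
  let max_token_num : Int := (PySem.List.max? (token_lens.map (fun x => (x.length : Int))) (fun y => y)).getD 0
  let max_token_len : Int := (PySem.List.max? (token_lens.map (fun x => (PySem.List.max? x (fun y => y)).getD 0)) (fun y => y)).getD 0
  let st := (PySem.List.pyRange 0 max_token_num 1).foldl
    (fun (st : List Int × List (List (List Int))) j =>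
      let cn := (st.1.zip token_lens).foldl
        (fun (cn : List (List Int) × List Int) os =>
          if j < (os.2.length : Int) then
            let e := os.1 + (PySem.List.pyGet? os.2 j).getD 0
            (cn.1 ++ [[os.1, e]], cn.2 ++ [e])
          else
            (cn.1 ++ [([-1, 0] : List Int)], cn.2 ++ [os.1]))
        ([], [])
      (cn.2, st.2 ++ [cn.1]))
    (List.replicate token_lens.length 0, [])
  (pvZipStar st.2, max_token_num, max_token_len)

-- ===== PRECONDITION & SPEC =====
-- Pre_ excludes exactly where Python A raises ValueError: empty token_lens (outer max) or an
-- empty inner list (inner max); B raises there too.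
def Pre_token_lens_to_idxs (token_lens : List (List Int)) : Prop :=
  token_lens ≠ [] ∧ ∀ x ∈ token_lens, x ≠ []
instance (token_lens : List (List Int)) : Decidable (Pre_token_lens_to_idxs token_lens) := by
  unfold Pre_token_lens_to_idxs; infer_instance
def pvWitness_token_lens_to_idxs : List (List Int) := [[2, 1], [3]]

def Spec_token_lens_to_idxs (token_lens : List (List Int)) (out : List (List (List Int)) × Int × Int) : Prop := out = token_lens_to_idxs_alt token_lens
instance (token_lens : List (List Int)) (out : List (List (List Int)) × Int × Int) : Decidable (Spec_token_lens_to_idxs token_lens out) := by unfold Spec_token_lens_to_idxs; infer_instance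

-- ===== CLAIM (what is proved, stated in full; the proofs are below) =====
def Claim_equal_token_lens_to_idxs : Prop := ∀ (token_lens : List (List Int)), Dom_token_lens_to_idxs token_lens → Pre_token_lens_to_idxs token_lens → Spec_token_lens_to_idxs token_lens (token_lens_to_idxs token_lens)

-- ===== LEMMAS AND PROOFS =====

-- prefix sum of the first k token lengths, and the canonical table entry at position k
def pvS (k : Nat) (seq : List Int) : Int := (seq.take k).sum

def pvEntry (k : Nat) (seq : List Int) : List Int :=
  if k < seq.length then [pvS k seq, pvS (k+1) seq] else [-1, 0]

lemma pvS_succ (k : Nat) (seq : List Int) (h : k < seq.length) :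
    pvS (k+1) seq = pvS k seq + seq[k] := by
  unfold pvS
  have ht : seq.take (k+1) = seq.take k ++ [seq[k]] := by
    rw [List.take_add_one, List.getElem?_eq_getElem h]
    rfl
  rw [ht, List.sum_append, List.sum_cons, List.sum_nil, add_zero]

lemma pvS_stable (k : Nat) (seq : List Int) (h : seq.length ≤ k) :
    pvS (k+1) seq = pvS k seq := by
  unfold pvS
  rw [List.take_of_length_le h, List.take_of_length_le (by omega)]

-- A's inner loop
lemma A_inner (seq : List Int) : ∀ (acc : List (List Int)) (off : Int),
    seq.foldl (fun (st : List (List Int) × Int) t =>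
      (st.1 ++ [[st.2, st.2 + t]], st.2 + t)) (acc, off)
    = (acc ++ (List.range seq.length).map (fun k => [off + pvS k seq, off + pvS (k+1) seq]),
       off + seq.sum) := by
  induction seq with
  | nil => intro acc off; simp [pvS]
  | cons t ts ih =>
    intro acc off
    simp only [List.foldl_cons]
    rw [ih]
    refine Prod.ext ?_ ?_
    · simp only [List.length_cons, List.range_succ_eq_map, List.map_cons, List.map_map,
        List.append_assoc, List.singleton_append]
      congr 1
      simp [pvS]
      intro a _
      omega
    · simp; ring

-- A's row equals the canonical row, given seq.length ≤ M
lemma A_row (seq : List Int) (M : Nat) (h : seq.length ≤ M) :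
    (List.range M).map (fun k => pvEntry k seq)
    = (List.range seq.length).map (fun k => [pvS k seq, pvS (k+1) seq])
      ++ List.replicate (M - seq.length) ([-1, 0] : List Int) := by
  conv_lhs => rw [show M = seq.length + (M - seq.length) from (by omega), List.range_add,
    List.map_append]
  congr 1
  · apply List.map_congr_left
    intro k hk
    rw [List.mem_range] at hk
    simp [pvEntry, hk]
  · rw [List.map_map]
    apply List.eq_replicate_iff.mpr
    constructor
    · simp
    · intro b hb
      simp only [List.mem_map, List.mem_range, Function.comp] at hb
      obtain ⟨k, _, hk⟩ := hb
      rw [← hk]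
      simp [pvEntry]

-- generic two-list-append fold
lemma foldl_pair_append {γ δ ε : Type} (f : γ → δ) (g : γ → ε) (l : List γ) :
    ∀ (a : List δ) (b : List ε),
    l.foldl (fun cn x => (cn.1 ++ [f x], cn.2 ++ [g x])) (a, b) = (a ++ l.map f, b ++ l.map g) := by
  induction l with
  | nil => intro a b; simp
  | cons x xs ih => intro a b; simp [ih]

-- B's inner (per-column) loop at column k
lemma B_inner (token_lens : List (List Int)) (k : Nat) :
    ((token_lens.map (fun seq => pvS k seq)).zip token_lens).foldl
      (fun (cn : List (List Int) × List Int) os =>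
        if (k : Int) < (os.2.length : Int) then
          (cn.1 ++ [[os.1, os.1 + (PySem.List.pyGet? os.2 (k : Int)).getD 0]],
           cn.2 ++ [os.1 + (PySem.List.pyGet? os.2 (k : Int)).getD 0])
        else
          (cn.1 ++ [([-1, 0] : List Int)], cn.2 ++ [os.1]))
      ([], [])
    = (token_lens.map (fun seq => pvEntry k seq), token_lens.map (fun seq => pvS (k+1) seq)) := by
  have hz : ∀ (l : List (List Int)), (l.map (fun seq => pvS k seq)).zip l
      = l.map (fun seq => (pvS k seq, seq)) := by
    intro l
    induction l with
    | nil => rfl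
    | cons a as ih => simp [ih]
  rw [hz token_lens, List.foldl_map]
  have hstep : (fun (cn : List (List Int) × List Int) (seq : List Int) =>
      if (k : Int) < (seq.length : Int) then
        (cn.1 ++ [[pvS k seq, pvS k seq + (PySem.List.pyGet? seq (k : Int)).getD 0]],
         cn.2 ++ [pvS k seq + (PySem.List.pyGet? seq (k : Int)).getD 0])
      else
        (cn.1 ++ [([-1, 0] : List Int)], cn.2 ++ [pvS k seq]))
      = (fun cn seq => (cn.1 ++ [pvEntry k seq], cn.2 ++ [pvS (k+1) seq])) := by
    funext cn seq
    by_cases h : k < seq.length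
    · rw [if_pos (by exact_mod_cast h)]
      have hget : (PySem.List.pyGet? seq (k : Int)).getD 0 = seq[k] := by
        rw [PySem.List.pyGet?_natCast, List.getElem?_eq_getElem h]; rfl
      rw [hget, pvEntry, if_pos h, pvS_succ k seq h]
    · rw [if_neg (by exact_mod_cast h)]
      rw [pvEntry, if_neg h, pvS_stable k seq (by omega)]
  rw [hstep, foldl_pair_append]
  simp

-- B's outer loop invariant
lemma B_outer (token_lens : List (List Int)) : ∀ (M : Nat),
    (PySem.List.pyRange 0 (M : Int) 1).foldl
      (fun (st : List Int × List (List (List Int))) j =>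
        let cn := (st.1.zip token_lens).foldl
          (fun (cn : List (List Int) × List Int) os =>
            if j < (os.2.length : Int) then
              (cn.1 ++ [[os.1, os.1 + (PySem.List.pyGet? os.2 j).getD 0]],
               cn.2 ++ [os.1 + (PySem.List.pyGet? os.2 j).getD 0])
            else
              (cn.1 ++ [([-1, 0] : List Int)], cn.2 ++ [os.1]))
          ([], [])
        (cn.2, st.2 ++ [cn.1]))
      (List.replicate token_lens.length 0, [])
    = (token_lens.map (fun seq => pvS M seq),
       (List.range M).map (fun k => token_lens.map (fun seq => pvEntry k seq))) := by
  intro M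
  induction M with
  | zero =>
    rw [PySem.List.pyRange_one_eq_nil (by norm_num)]
    simp [pvS]
  | succ M ih =>
    have hsplit : PySem.List.pyRange 0 ((M+1 : Nat) : Int) 1
        = PySem.List.pyRange 0 (M : Int) 1 ++ [(M : Int)] := by
      push_cast
      exact PySem.List.pyRange_one_succ_right (by positivity)
    rw [hsplit, List.foldl_append, ih]
    simp only [List.foldl_cons, List.foldl_nil]
    rw [B_inner token_lens M]
    rw [List.range_succ, List.map_append]
    simp

-- the rectangular transpose: pvZipStar of the columns is the list of rows
lemma zipStar_rect {α β : Type} (g : Nat → α → β) :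
    ∀ (l : List α) (M : Nat), 1 ≤ M →
    pvZipStar ((List.range M).map (fun k => l.map (g k)))
    = l.map (fun x => (List.range M).map (fun k => g k x)) := by
  intro l
  induction l with
  | nil =>
    intro M hM
    rw [pvZipStar]
    rw [dif_pos]
    · simp
    · simp only [List.map_nil, Bool.or_eq_true, List.any_eq_true]
      right
      exact ⟨[], List.mem_map.mpr ⟨0, List.mem_range.mpr (by omega), rfl⟩, rfl⟩
  | cons x xs ih =>
    intro M hM
    rw [pvZipStar]
    rw [dif_neg]
    · have hhead : ((List.range M).map (fun k => (x :: xs).map (g k))).filterMap List.head?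
          = (List.range M).map (fun k => g k x) := by
        rw [List.filterMap_map]
        apply List.filterMap_eq_map_iff_forall_eq_some.mpr
        intro k _
        rfl
      have htail : ((List.range M).map (fun k => (x :: xs).map (g k))).map List.tail
          = (List.range M).map (fun k => xs.map (g k)) := by
        rw [List.map_map]; rfl
      rw [hhead, htail, ih M hM]
      simp
    · simp only [Bool.or_eq_true, List.any_eq_true, not_or]
      refine ⟨?_, ?_⟩
      · intro hemp
        rw [List.isEmpty_iff, List.map_eq_nil_iff, List.range_eq_nil] at hemp
        omega
      · rintro ⟨y, hy, hempty⟩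
        rw [List.mem_map] at hy
        obtain ⟨k, _, rfl⟩ := hy
        simp at hempty

-- the maximum of the lengths bounds every length and is ≥ 1 under Pre_
lemma max_len_facts (token_lens : List (List Int)) (h : Pre_token_lens_to_idxs token_lens) :
    ∃ M : Nat, 1 ≤ M ∧ (∀ seq ∈ token_lens, seq.length ≤ M) ∧
      ((PySem.List.max? (token_lens.map (fun x => (x.length : Int))) (fun y => y)).getD 0 = (M : Int)) := by
  obtain ⟨hne, hinner⟩ := h
  have hmapne : token_lens.map (fun x => (x.length : Int)) ≠ [] := by
    simp [hne]
  obtain ⟨m, hm⟩ : ∃ m, PySem.List.max? (token_lens.map (fun x => (x.length : Int))) (fun y => y) = some m := by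
    cases hmax : PySem.List.max? (token_lens.map (fun x => (x.length : Int))) (fun y => y) with
    | none =>
      rw [PySem.List.max?_eq_none_iff] at hmax
      exact absurd hmax hmapne
    | some m => exact ⟨m, rfl⟩
  have hmem := PySem.List.max?_mem hm
  have hmax := PySem.List.max?_isMax hm
  rw [List.mem_map] at hmem
  obtain ⟨seq, hseq, hlen⟩ := hmem
  have hseqne := hinner seq hseq
  have hpos : (1 : Int) ≤ m := by
    rw [← hlen]
    have := List.length_pos_of_ne_nil hseqne
    omega
  refine ⟨m.toNat, by omega, ?_, ?_⟩
  · intro s hs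
    have := hmax ((s.length : Int)) (List.mem_map.mpr ⟨s, hs, rfl⟩)
    simp only at this
    omega
  · rw [hm]
    simp only [Option.getD_some]
    omega

-- ===== VERDICT (by name: the statement is the Claim_ definition above) =====
theorem token_lens_to_idxs_spec : Claim_equal_token_lens_to_idxs := by
  intro token_lens _ hpre
  unfold Spec_token_lens_to_idxs token_lens_to_idxs token_lens_to_idxs_alt
  obtain ⟨M, hM1, hMle, hMeq⟩ := max_len_facts token_lens hpre
  simp only [hMeq]
  refine Prod.ext ?_ rfl
  simp only
  rw [B_outer token_lens M]
  rw [zipStar_rect (fun k seq => pvEntry k seq) token_lens M hM1]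
  rw [PySem.List.foldl_append_singleton_eq_map, List.nil_append]
  apply List.map_congr_left
  intro seq hseq
  have hle := hMle seq hseq
  have := A_inner seq [] 0
  rw [this]
  simp only [List.nil_append]
  have hcast : ((M : Int) - (seq.length : Int)).toNat = M - seq.length := by omega
  rw [hcast]
  have hsimp : (List.range seq.length).map (fun k => [(0:Int) + pvS k seq, 0 + pvS (k+1) seq])
      = (List.range seq.length).map (fun k => [pvS k seq, pvS (k+1) seq]) := by
    apply List.map_congr_left; intro k _; simp
  rw [hsimp, ← A_row seq M hle]
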